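-- pv_equiv track=rewrite | github.com/MegaGiciorPortas/WDI-Zadania | 01-zmienne/1.48.py | czy_istnieje_X
-- ===== SOURCE A (Python) =====
-- def zliczanie_powstalych_liczb(n):
--     suma = n
--     while n > 0:
--         n //= 10
--         suma += n
--     return suma
--
-- def czy_istnieje_X(S):
--     left = 0
--     right = S
--
--     while left <= right:
--         mid = (left + right) // 2
--
--         mid_suma = zliczanie_powstalych_liczb(mid)
--
--         if mid_suma == S:
--             return mid
--
--         if mid_suma < S:
--             left = mid + 1
--         else:
--             right = mid - 1
--     return -1
-- ===== SOURCE B (Python) =====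
-- def zliczanie_powstalych_liczb(n):
--     suma = n
--     while n > 0:
--         n //= 10
--         suma += n
--     return suma
--
-- def czy_istnieje_X(S):
--     # 9*f(X) <= 10*X for X >= 0, so any solution satisfies X >= ceil(9*S/10);
--     # scan the short window upward, stopping once f exceeds S.
--     lo = max(0, (9 * S + 9) // 10)
--     for X in range(lo, S + 1):
--         s = zliczanie_powstalych_liczb(X)
--         if s == S:
--             return X
--         if s > S:
--             return -1
--     return -1
-- ===== Notes on version B (the rewrite author's own statement) =====
-- stated objective: alternative
-- what changed: Replaced A's binary search over [0,S] by deriving a proved lower bound ceil(9*S/10) for any solution (since 9*f(X) <= 10*X) and scanning the short remaining window upward, stopping as soon as f(X) exceeds S.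
import Mathlib
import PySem

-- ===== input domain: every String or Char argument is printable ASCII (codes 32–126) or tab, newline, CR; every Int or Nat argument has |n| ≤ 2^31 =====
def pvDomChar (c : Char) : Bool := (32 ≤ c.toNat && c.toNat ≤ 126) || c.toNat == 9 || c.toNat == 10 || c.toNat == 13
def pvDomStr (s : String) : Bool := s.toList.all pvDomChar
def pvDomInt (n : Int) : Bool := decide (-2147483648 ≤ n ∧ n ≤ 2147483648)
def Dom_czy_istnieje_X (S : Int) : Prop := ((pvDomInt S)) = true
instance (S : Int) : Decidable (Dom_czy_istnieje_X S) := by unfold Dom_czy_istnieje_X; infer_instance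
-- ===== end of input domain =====

-- B replaces A's binary search by an arithmetically derived lower bound ceil(9S/10)
-- followed by a short upward scan (objective: alternative, same cost class).

-- termination helper for the shared digit-truncation loop
theorem pvFd10 (n : Int) (h : 0 < n) :
    0 ≤ PySem.Int.floordiv n 10 ∧ PySem.Int.floordiv n 10 < n := by
  rw [PySem.Int.floordiv_eq_ediv_of_pos (by norm_num)]
  have h1 := Int.emod_nonneg n (by norm_num : (10:Int) ≠ 0)
  have h2 := Int.emod_lt_of_pos n (by norm_num : (0:Int) < 10)
  have h3 := Int.ediv_add_emod n 10
  omega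

-- ===== PORT A =====
-- shared helper: suma = n; while n > 0: n //= 10; suma += n
def zliczLoop (n suma : Int) : Int :=
  if h : 0 < n then
    zliczLoop (PySem.Int.floordiv n 10) (suma + PySem.Int.floordiv n 10)
  else suma
termination_by n.toNat
decreasing_by have := pvFd10 n h; omega

def zlicz (n : Int) : Int := zliczLoop n n

-- the while-loop of A's binary search
def bsGo (S left right : Int) : Int :=
  if h : left ≤ right then
    let mid := PySem.Int.floordiv (left + right) 2
    let mid_suma := zlicz mid
    if mid_suma = S then mid
    else if mid_suma < S then bsGo S (mid + 1) right
    else bsGo S left (mid - 1)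
  else -1
termination_by (right + 1 - left).toNat
decreasing_by
  · have := PySem.Int.floordiv_two_mid_bounds h; omega
  · have := PySem.Int.floordiv_two_mid_bounds h; omega

def czy_istnieje_X (S : Int) : Int := bsGo S 0 S

-- ===== PORT B =====
-- the for-loop of B: scan X upward from lo while X ≤ S
def linGo (S X : Int) : Int :=
  if h : X ≤ S then
    let s := zlicz X
    if s = S then X
    else if S < s then -1
    else linGo S (X + 1)
  else -1
termination_by (S + 1 - X).toNat
decreasing_by omega

def czy_istnieje_X_alt (S : Int) : Int :=
  linGo S (max 0 (PySem.Int.floordiv (9 * S + 9) 10))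

-- ===== PRECONDITION & SPEC =====
def Spec_czy_istnieje_X (S : Int) (out : Int) : Prop := out = czy_istnieje_X_alt S
instance (S : Int) (out : Int) : Decidable (Spec_czy_istnieje_X S out) := by unfold Spec_czy_istnieje_X; infer_instance

-- ===== CLAIM (what is proved, stated in full; the proofs are below) =====
def Claim_equal_czy_istnieje_X : Prop := ∀ (S : Int), Dom_czy_istnieje_X S → Spec_czy_istnieje_X S (czy_istnieje_X S)

-- ===== LEMMAS AND PROOFS =====

-- both results satisfy: "a solution in [0,S]" or "-1 and there is none"
def IsRes (S v : Int) : Prop :=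
  (0 ≤ v ∧ v ≤ S ∧ zlicz v = S) ∨
  (v = -1 ∧ ∀ r, 0 ≤ r → r ≤ S → zlicz r ≠ S)

theorem zliczLoop_shift (k : Nat) : ∀ n s t : Int, n.toNat ≤ k →
    zliczLoop n (s + t) = zliczLoop n s + t := by
  induction k with
  | zero =>
    intro n s t hk
    conv_lhs => rw [zliczLoop]
    conv_rhs => rw [zliczLoop]
    split_ifs with h
    · omega
    · rfl
  | succ k ih =>
    intro n s t hk
    conv_lhs => rw [zliczLoop]
    conv_rhs => rw [zliczLoop]
    split_ifs with h
    · have hf := pvFd10 n h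
      rw [show s + t + PySem.Int.floordiv n 10
            = s + PySem.Int.floordiv n 10 + t by ring]
      exact ih (PySem.Int.floordiv n 10) (s + PySem.Int.floordiv n 10) t (by omega)
    · rfl

def F (n : Int) : Int := zliczLoop n 0

theorem F_nonpos (n : Int) (h : ¬ 0 < n) : F n = 0 := by
  unfold F; rw [zliczLoop]; simp [h]

theorem F_pos (n : Int) (h : 0 < n) :
    F n = F (PySem.Int.floordiv n 10) + PySem.Int.floordiv n 10 := by
  unfold F
  rw [zliczLoop]
  simp only [dif_pos h]
  have := zliczLoop_shift (PySem.Int.floordiv n 10).toNat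
    (PySem.Int.floordiv n 10) 0 (PySem.Int.floordiv n 10) le_rfl
  simpa using this

theorem zlicz_eq (n : Int) : zlicz n = n + F n := by
  unfold zlicz F
  have := zliczLoop_shift n.toNat n 0 n le_rfl
  rw [show (0 : Int) + n = n by ring] at this
  rw [this]; ring

theorem F_nonneg (k : Nat) : ∀ n : Int, n.toNat ≤ k → 0 ≤ F n := by
  induction k with
  | zero => intro n hk; rw [F_nonpos n (by omega)]
  | succ k ih =>
    intro n hk
    by_cases h : 0 < n
    · have hf := pvFd10 n h
      rw [F_pos n h]
      have := ih (PySem.Int.floordiv n 10) (by omega)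
      omega
    · rw [F_nonpos n h]

theorem F_nonneg' (n : Int) : 0 ≤ F n := F_nonneg n.toNat n le_rfl

theorem fd10_mono (a b : Int) (hab : a ≤ b) :
    PySem.Int.floordiv a 10 ≤ PySem.Int.floordiv b 10 := by
  rw [PySem.Int.floordiv_eq_ediv_of_pos (by norm_num),
      PySem.Int.floordiv_eq_ediv_of_pos (by norm_num)]
  exact Int.ediv_le_ediv (by norm_num) hab

theorem F_mono (k : Nat) : ∀ a b : Int, b.toNat ≤ k → 0 ≤ a → a ≤ b → F a ≤ F b := by
  induction k with
  | zero =>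
    intro a b hk h0 hab
    have ha : ¬ 0 < a := by omega
    rw [F_nonpos a ha]
    exact F_nonneg' b
  | succ k ih =>
    intro a b hk h0 hab
    by_cases ha : 0 < a
    · have hb : 0 < b := by omega
      have hfa := pvFd10 a ha
      have hfb := pvFd10 b hb
      rw [F_pos a ha, F_pos b hb]
      have hm := fd10_mono a b hab
      have := ih (PySem.Int.floordiv a 10) (PySem.Int.floordiv b 10) (by omega) (by omega) hm
      omega
    · rw [F_nonpos a ha]
      have := F_nonneg' b
      omega

theorem zlicz_strict (a b : Int) (h0 : 0 ≤ a) (hab : a < b) : zlicz a < zlicz b := by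
  rw [zlicz_eq, zlicz_eq]
  have := F_mono b.toNat a b le_rfl h0 (by omega)
  omega

theorem zlicz_mono (a b : Int) (h0 : 0 ≤ a) (hab : a ≤ b) : zlicz a ≤ zlicz b := by
  rw [zlicz_eq, zlicz_eq]
  have := F_mono b.toNat a b le_rfl h0 hab
  omega

theorem zlicz_ge (n : Int) (h : 0 ≤ n) : n ≤ zlicz n := by
  rw [zlicz_eq]; have := F_nonneg' n; omega

-- 9 * F n ≤ n for 0 ≤ n, hence 9 * zlicz n ≤ 10 * n
theorem F_bound (k : Nat) : ∀ n : Int, n.toNat ≤ k → 0 ≤ n → 9 * F n ≤ n := by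
  induction k with
  | zero => intro n hk h0; rw [F_nonpos n (by omega)]; omega
  | succ k ih =>
    intro n hk h0
    by_cases h : 0 < n
    · have hf := pvFd10 n h
      rw [F_pos n h]
      have hih := ih (PySem.Int.floordiv n 10) (by omega) (by omega)
      have hq : 10 * PySem.Int.floordiv n 10 ≤ n := by
        rw [PySem.Int.floordiv_eq_ediv_of_pos (by norm_num)]
        have h1 := Int.emod_nonneg n (by norm_num : (10:Int) ≠ 0)
        have h3 := Int.ediv_add_emod n 10
        omega
      omega
    · rw [F_nonpos n h]; omega

theorem zlicz_bound (n : Int) (h : 0 ≤ n) : 9 * zlicz n ≤ 10 * n := by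
  rw [zlicz_eq]
  have := F_bound n.toNat n le_rfl h
  omega

theorem isRes_unique (S v1 v2 : Int) (h1 : IsRes S v1) (h2 : IsRes S v2) : v1 = v2 := by
  rcases h1 with ⟨hv1, hle1, hz1⟩ | ⟨he1, hno1⟩
  · rcases h2 with ⟨hv2, hle2, hz2⟩ | ⟨he2, hno2⟩
    · rcases lt_trichotomy v1 v2 with h | h | h
      · have := zlicz_strict v1 v2 hv1 h; omega
      · exact h
      · have := zlicz_strict v2 v1 hv2 h; omega
    · exact absurd hz1 (hno2 v1 hv1 hle1)
  · rcases h2 with ⟨hv2, hle2, hz2⟩ | ⟨he2, hno2⟩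
    · exact absurd hz2 (hno1 v2 hv2 hle2)
    · omega

theorem bs_isRes (S : Int) (k : Nat) : ∀ left right : Int,
    (right + 1 - left).toNat ≤ k → 0 ≤ left →
    (∀ r, 0 ≤ r → r ≤ S → zlicz r = S → left ≤ r ∧ r ≤ right) →
    IsRes S (bsGo S left right) := by
  induction k with
  | zero =>
    intro left right hk h0 hinv
    rw [bsGo]
    have h : ¬ left ≤ right := by omega
    simp only [h, dite_false]
    exact Or.inr ⟨rfl, fun r hr hrS hz => by have := hinv r hr hrS hz; omega⟩
  | succ k ih =>
    intro left right hk h0 hinv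
    rw [bsGo]
    split_ifs with h
    · have hmid := PySem.Int.floordiv_two_mid_bounds h
      set mid := PySem.Int.floordiv (left + right) 2 with hmiddef
      simp only
      split_ifs with he hlt
      · -- zlicz mid = S : mid is a solution
        refine Or.inl ⟨by omega, ?_, he⟩
        have := zlicz_ge mid (by omega)
        omega
      · -- zlicz mid < S : recurse right half
        apply ih (mid + 1) right (by omega) (by omega)
        intro r hr hrS hz
        have hinv' := hinv r hr hrS hz
        by_cases hrm : r ≤ mid
        · have := zlicz_mono r mid hr hrm; omega
        · omega
      · -- zlicz mid > S : recurse left half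
        apply ih left (mid - 1) (by omega) h0
        intro r hr hrS hz
        have hinv' := hinv r hr hrS hz
        by_cases hrm : mid ≤ r
        · have := zlicz_mono mid r (by omega) hrm; omega
        · omega
    · exact Or.inr ⟨rfl, fun r hr hrS hz => by have := hinv r hr hrS hz; omega⟩

theorem lin_isRes (S : Int) (k : Nat) : ∀ X : Int,
    (S + 1 - X).toNat ≤ k → 0 ≤ X →
    (∀ r, 0 ≤ r → r < X → zlicz r ≠ S) →
    IsRes S (linGo S X) := by
  induction k with
  | zero =>
    intro X hk h0 hlow
    rw [linGo]
    have h : ¬ X ≤ S := by omega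
    simp only [h, dite_false]
    exact Or.inr ⟨rfl, fun r hr hrS => hlow r hr (by omega)⟩
  | succ k ih =>
    intro X hk h0 hlow
    rw [linGo]
    simp only
    split_ifs with h he hgt
    · exact Or.inl ⟨h0, h, he⟩
    · -- zlicz X > S : no solution at all
      refine Or.inr ⟨rfl, fun r hr hrS hz => ?_⟩
      by_cases hrX : r < X
      · exact hlow r hr hrX hz
      · have := zlicz_mono X r h0 (by omega); omega
    · -- zlicz X < S : continue
      apply ih (X + 1) (by omega) (by omega)
      intro r hr hrX
      by_cases hrX' : r < X
      · exact hlow r hr hrX'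
      · have hrXeq : r = X := by omega
        subst hrXeq; omega
    · exact Or.inr ⟨rfl, fun r hr hrS => hlow r hr (by omega)⟩

theorem lin_init_isRes (S : Int) : IsRes S (czy_istnieje_X_alt S) := by
  unfold czy_istnieje_X_alt
  set lo := max 0 (PySem.Int.floordiv (9 * S + 9) 10) with hlodef
  apply lin_isRes S (S + 1 - lo).toNat lo le_rfl (by omega)
  intro r hr hrlo hz
  have hb := zlicz_bound r hr
  rw [hz] at hb
  have hq : 10 * PySem.Int.floordiv (9 * S + 9) 10 ≤ 9 * S + 9 ∧
      9 * S + 9 < 10 * PySem.Int.floordiv (9 * S + 9) 10 + 10 := by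
    rw [PySem.Int.floordiv_eq_ediv_of_pos (by norm_num)]
    have h1 := Int.emod_nonneg (9 * S + 9) (by norm_num : (10:Int) ≠ 0)
    have h2 := Int.emod_lt_of_pos (9 * S + 9) (by norm_num : (0:Int) < 10)
    have h3 := Int.ediv_add_emod (9 * S + 9) 10
    omega
  omega

theorem bs_init_isRes (S : Int) : IsRes S (czy_istnieje_X S) := by
  unfold czy_istnieje_X
  apply bs_isRes S (S + 1 - 0).toNat 0 S le_rfl le_rfl
  intro r hr hrS _
  exact ⟨hr, hrS⟩

-- ===== VERDICT (by name: the statement is the Claim_ definition above) =====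
theorem czy_istnieje_X_spec : Claim_equal_czy_istnieje_X := by
  intro S _
  unfold Spec_czy_istnieje_X
  exact isRes_unique S _ _ (bs_init_isRes S) (lin_init_isRes S)
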